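-- pv_equiv track=rewrite | github.com/animeshprasad/science_ie | data/parse_for_relations.py | SFLF1
-- ===== SOURCE A (Python) =====
-- def SFLF1(s1, s2):
--     chars=[]
--     if s1.upper() == s1:
--         ff=s1
--         nf=s2
--     elif s2.upper() == s2:
--         ff=s2
--         nf=s1
--     else:
--         return 0
--     for items in nf:
--         if items.upper() == items and items.isalnum():
--             chars.append(items)
--     if ff == ''.join(chars):
--         return 1
--     else:
--         return 0
-- ===== SOURCE B (Python) =====
-- def SFLF1(s1, s2):
--     if s1.upper() == s1:
--         ff, nf = s1, s2
--     elif s2.upper() == s2: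
--         ff, nf = s2, s1
--     else:
--         return 0
--     j, n = 0, len(nf)
--     for ch in ff:
--         while j < n and not (nf[j].isalnum() and nf[j].upper() == nf[j]):
--             j += 1
--         if j == n or nf[j] != ch:
--             return 0
--         j += 1
--     while j < n:
--         if nf[j].isalnum() and nf[j].upper() == nf[j]:
--             return 0
--         j += 1
--     return 1
-- ===== Notes on version B (the rewrite author's own statement) =====
-- stated objective: alternative
-- what changed: B inverts the traversal: instead of filtering nf into a list, joining and comparing strings, it drives a two-pointer scan by iterating over ff, advancing a cursor through nf past non-qualifying characters to match each ff character in place, then checks no qualifying character remains.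
import Mathlib
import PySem

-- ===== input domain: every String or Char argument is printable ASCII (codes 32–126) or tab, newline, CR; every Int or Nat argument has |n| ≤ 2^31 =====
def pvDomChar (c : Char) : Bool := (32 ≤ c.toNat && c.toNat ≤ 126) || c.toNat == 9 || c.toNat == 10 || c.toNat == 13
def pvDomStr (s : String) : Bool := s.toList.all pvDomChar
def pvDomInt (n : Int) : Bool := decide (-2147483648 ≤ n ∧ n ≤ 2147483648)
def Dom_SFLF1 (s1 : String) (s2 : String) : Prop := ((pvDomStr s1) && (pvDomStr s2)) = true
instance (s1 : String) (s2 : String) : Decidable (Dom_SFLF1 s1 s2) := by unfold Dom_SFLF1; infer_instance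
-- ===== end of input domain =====

-- B replaces A's filter-join-and-compare over nf with a two-pointer scan driven by ff (alternative traversal, same cost).


-- ===== PORT A =====
-- 'items.upper() == items and items.isalnum()' on the one-character string items: exact via upperChar/isalnum on its char
def pvKeepA (c : Char) : Bool := (PySem.Chars.upperChar c == c) && PySem.Chars.isalnum c

def SFLF1 (s1 : String) (s2 : String) : Int :=
  if PySem.Str.upper s1 == s1 then
    -- ff = s1, nf = s2
    let chars := s2.toList.foldl (fun acc c => if pvKeepA c then acc ++ [c] else acc) []
    if s1.toList == chars then 1 else 0
  else if PySem.Str.upper s2 == s2 then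
    let chars := s1.toList.foldl (fun acc c => if pvKeepA c then acc ++ [c] else acc) []
    if s2.toList == chars then 1 else 0
  else 0

-- ===== PORT B =====
-- 'nf[j].isalnum() and nf[j].upper() == nf[j]' from Source B
def pvQual (c : Char) : Bool := PySem.Chars.isalnum c && (PySem.Chars.upperChar c == c)

-- Source B's inner 'while j < n and not qual: j += 1': the cursor j into nf is rendered by the unconsumed suffix
def pvSkip : List Char → List Char
  | [] => []
  | c :: r => if !(pvQual c) then pvSkip r else c :: r

theorem pvSkip_len_le : ∀ l : List Char, (pvSkip l).length ≤ l.length := by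
  intro l; induction l with
  | nil => simp [pvSkip]
  | cons c r ih =>
    simp only [pvSkip]
    split
    · exact Nat.le_trans ih (Nat.le_succ _)
    · simp

-- Source B's outer 'for ch in ff' loop with cursor suffix 'rest'; the empty-ff case is the trailing while loop
def pvLoop : List Char → List Char → Int
  | [], rest => if pvSkip rest = [] then 1 else 0
  | f :: ftl, rest =>
    match hsk : pvSkip rest with
    | [] => 0
    | c :: r => if c == f then pvLoop ftl r else 0
termination_by ff rest => ff.length + rest.length
decreasing_by
  have := pvSkip_len_le rest
  rw [hsk] at this
  simp at this ⊢
  omega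

def SFLF1_alt (s1 : String) (s2 : String) : Int :=
  if PySem.Str.upper s1 == s1 then pvLoop s1.toList s2.toList
  else if PySem.Str.upper s2 == s2 then pvLoop s2.toList s1.toList
  else 0

-- ===== PRECONDITION & SPEC =====
def Spec_SFLF1 (s1 : String) (s2 : String) (out : Int) : Prop := out = SFLF1_alt s1 s2
instance (s1 : String) (s2 : String) (out : Int) : Decidable (Spec_SFLF1 s1 s2 out) := by unfold Spec_SFLF1; infer_instance

-- ===== CLAIM (what is proved, stated in full; the proofs are below) =====
def Claim_equal_SFLF1 : Prop := ∀ (s1 : String) (s2 : String), Dom_SFLF1 s1 s2 → Spec_SFLF1 s1 s2 (SFLF1 s1 s2)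

-- ===== LEMMAS AND PROOFS =====

theorem pvKeep_eq (c : Char) : pvKeepA c = pvQual c := by
  simp [pvKeepA, pvQual, Bool.and_comm]

theorem foldl_app (nf : List Char) : ∀ acc : List Char,
    nf.foldl (fun acc c => if pvKeepA c then acc ++ [c] else acc) acc
      = acc ++ nf.filter pvQual := by
  induction nf with
  | nil => simp
  | cons c rest ih =>
    intro acc
    simp only [List.foldl_cons, List.filter_cons, pvKeep_eq c]
    by_cases h : pvQual c = true <;> simp [h, ih]

theorem pvSkip_filter : ∀ l : List Char, l.filter pvQual = (pvSkip l).filter pvQual := by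
  intro l; induction l with
  | nil => simp [pvSkip]
  | cons c r ih =>
    simp only [pvSkip, List.filter_cons]
    by_cases h : pvQual c = true <;> simp [h, ih]

theorem pvSkip_head {l : List Char} {c : Char} {r : List Char}
    (h : pvSkip l = c :: r) : pvQual c = true := by
  induction l with
  | nil => simp [pvSkip] at h
  | cons a t ih =>
    simp only [pvSkip] at h
    by_cases ha : pvQual a = true
    · simp [ha] at h; rw [← h.1]; exact ha
    · simp [ha] at h; exact ih h

theorem pvLoop_eq : ∀ (ff nf : List Char),
    pvLoop ff nf = if ff = nf.filter pvQual then 1 else 0 := by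
  intro ff
  induction ff with
  | nil =>
    intro nf
    rw [pvLoop, pvSkip_filter nf]
    cases h : pvSkip nf with
    | nil => simp
    | cons c r =>
      have hc := pvSkip_head h
      simp [hc]
  | cons f ftl ih =>
    intro nf
    rw [pvLoop, pvSkip_filter nf]
    split
    next h => simp [h]
    next c r h =>
      have hc := pvSkip_head h
      rw [h]
      simp only [List.filter_cons, hc, if_pos]
      by_cases hcf : (c == f) = true
      · have : c = f := by simpa using hcf
        subst this
        simp [ih r]
      · have : ¬ c = f := by simpa using hcf
        simp [hcf, Ne.symm this]

theorem pvBranch (ff nf : String) :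
    (if ff.toList == nf.toList.foldl (fun acc c => if pvKeepA c then acc ++ [c] else acc) [] then (1:Int) else 0)
      = pvLoop ff.toList nf.toList := by
  rw [foldl_app, pvLoop_eq]
  simp

-- ===== VERDICT (by name: the statement is the Claim_ definition above) =====
theorem SFLF1_spec : Claim_equal_SFLF1 := by
  intro s1 s2 _
  unfold Spec_SFLF1 SFLF1 SFLF1_alt
  by_cases h1 : (PySem.Str.upper s1 == s1) = true
  · simp only [h1, if_true]; exact pvBranch s1 s2
  · by_cases h2 : (PySem.Str.upper s2 == s2) = true
    · simp only [h1, h2, Bool.false_eq_true, ite_false]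
      exact pvBranch s2 s1
    · simp [h1, h2]
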